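-- pv_equiv track=rewrite | github.com/pankajmourya123/java | Timepass.py | min_rotations
-- ===== SOURCE A (Python) =====
-- def min_rotations(s):
--     counts = {'"': 0, 'V': 0, 'v': 0, '>': 0}
--
--     for direction in s:
--         if direction in counts:
--             counts[direction] += 1
--
--     max_count = 0
--     for count in counts.values():
--         max_count = max(max_count, count)
--
--     return len(s) - max_count
-- ===== SOURCE B (Python) =====
-- def min_rotations(s):
--     # Sort-then-scan: collect the tracked direction characters, sort them so
--     # equal characters become adjacent, and find the longest run of equal
--     # characters; the answer is len(s) minus that run length.
--     t = sorted(c for c in s if c in '"Vv>')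
--     best = 0
--     run = 0
--     prev = None
--     for c in t:
--         run = run + 1 if c == prev else 1
--         if run > best:
--             best = run
--         prev = c
--     return len(s) - best
-- ===== Notes on version B (the rewrite author's own statement) =====
-- stated objective: alternative
-- what changed: Replaces A's dict counting plus max-over-values with a sort-then-scan mode computation: sort the tracked characters so equal ones are adjacent, then one pass finds the longest run of equal characters.
import Mathlib
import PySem

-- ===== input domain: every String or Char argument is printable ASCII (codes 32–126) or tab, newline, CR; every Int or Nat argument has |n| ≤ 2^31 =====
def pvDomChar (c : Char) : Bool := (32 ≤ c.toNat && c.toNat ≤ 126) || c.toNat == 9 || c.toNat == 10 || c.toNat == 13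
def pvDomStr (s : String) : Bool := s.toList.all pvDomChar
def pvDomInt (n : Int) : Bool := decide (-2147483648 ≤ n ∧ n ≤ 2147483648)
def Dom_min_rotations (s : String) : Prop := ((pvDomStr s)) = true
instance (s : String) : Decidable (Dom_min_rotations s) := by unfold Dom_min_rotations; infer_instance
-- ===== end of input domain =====

-- B replaces A's dict counting and max-over-values with sort-then-scan: sort the tracked
-- direction characters and find the longest run of equal characters (objective: alternative).
-- ===== PORT A =====
def min_rotations (s : String) : Int :=
  let counts : PySem.Dict Char Int := PySem.Dict.ofList [('"', 0), ('V', 0), ('v', 0), ('>', 0)]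
  let counts := s.toList.foldl
    (fun d direction => if d.contains direction then d.modify direction 0 (· + 1) else d) counts
  let max_count := counts.values.foldl (fun m c => max m c) (0 : Int)
  (PySem.Str.len s : Int) - max_count

-- ===== PORT B =====
-- loop body of Source B: run = run + 1 if c == prev else 1; if run > best: best = run; prev = c
def mrAltStep (st : Int × Int × Option Char) (c : Char) : Int × Int × Option Char :=
  let run := if some c == st.2.2 then st.2.1 + 1 else 1
  let best := if run > st.1 then run else st.1
  (best, run, some c)


def min_rotations_alt (s : String) : Int :=
  let t := PySem.List.sorted (s.toList.filter (fun c => ("\"Vv>".toList).contains c))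
             (fun x => x) false
  let st := t.foldl mrAltStep ((0 : Int), (0 : Int), (none : Option Char))
  (PySem.Str.len s : Int) - st.1

-- ===== PRECONDITION & SPEC =====
def Spec_min_rotations (s : String) (out : Int) : Prop := out = min_rotations_alt s
instance (s : String) (out : Int) : Decidable (Spec_min_rotations s out) := by unfold Spec_min_rotations; infer_instance

-- ===== CLAIM (what is proved, stated in full; the proofs are below) =====
def Claim_equal_min_rotations : Prop := ∀ (s : String), Dom_min_rotations s → Spec_min_rotations s (min_rotations s)

-- ===== LEMMAS AND PROOFS =====

-- A's loop step on the 4-key dict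
lemma mr_step (a b c e : Int) (x : Char) :
    (if (PySem.Dict.mk [('"', a), ('V', b), ('v', c), ('>', e)]).contains x
      then (PySem.Dict.mk [('"', a), ('V', b), ('v', c), ('>', e)]).modify x 0 (· + 1)
      else PySem.Dict.mk [('"', a), ('V', b), ('v', c), ('>', e)]) =
    PySem.Dict.mk [('"', if x = '"' then a + 1 else a), ('V', if x = 'V' then b + 1 else b),
                   ('v', if x = 'v' then c + 1 else c), ('>', if x = '>' then e + 1 else e)] := by
  by_cases h1 : x = '"' <;> by_cases h2 : x = 'V' <;> by_cases h3 : x = 'v' <;>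
    by_cases h4 : x = '>' <;>
  simp_all [PySem.Dict.contains, PySem.Dict.modify, PySem.Dict.insert, PySem.Dict.getD,
            PySem.Dict.get?, add_comm] <;> tauto

-- A's counting loop characterised
lemma mr_loop (l : List Char) (a b c e : Int) :
    l.foldl (fun d direction => if d.contains direction then d.modify direction 0 (· + 1) else d)
      (PySem.Dict.mk [('"', a), ('V', b), ('v', c), ('>', e)]) =
    PySem.Dict.mk [('"', a + l.count '"'), ('V', b + l.count 'V'),
                   ('v', c + l.count 'v'), ('>', e + l.count '>')] := by
  induction l generalizing a b c e with
  | nil => simp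
  | cons x xs ih =>
    rw [List.foldl_cons, mr_step, ih]
    simp only [List.count_cons]
    split_ifs <;> simp_all <;> omega

-- B's run-scan inside a block of equal characters
lemma mr_inner (n : Nat) (b r : Int) (c : Char) :
    (List.replicate n c).foldl mrAltStep (b, r, some c) =
    if n = 0 then (b, r, some c) else (max b (r + n), r + n, some c) := by
  induction n generalizing b r with
  | zero => simp
  | succ m ih =>
    rw [List.replicate_succ, List.foldl_cons]
    have hstep : mrAltStep (b, r, some c) c = (max b (r + 1), r + 1, some c) := by
      simp only [mrAltStep, beq_self_eq_true, if_true]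
      have : (if r + 1 > b then r + 1 else b) = max b (r + 1) := by split_ifs <;> omega
      rw [this]
    rw [hstep, ih, if_neg (Nat.succ_ne_zero m)]
    by_cases h : m = 0
    · subst h; norm_num
    · rw [if_neg h]
      simp only [Prod.mk.injEq]
      refine ⟨?_, ?_, trivial⟩ <;> push_cast <;> omega

lemma mr_block (n : Nat) (b r : Int) (p : Option Char) (c : Char) (hp : p ≠ some c) :
    (List.replicate n c).foldl mrAltStep (b, r, p) =
    if n = 0 then (b, r, p) else (max b n, n, some c) := by
  cases n with
  | zero => simp
  | succ m =>
    rw [List.replicate_succ, List.foldl_cons]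
    have hbeq : (some c == p) = false := by
      rw [beq_eq_false_iff_ne]; exact fun h => hp h.symm
    have hstep : mrAltStep (b, r, p) c = (max b 1, 1, some c) := by
      simp only [mrAltStep, hbeq, Bool.false_eq_true, if_false]
      have : (if (1:Int) > b then (1:Int) else b) = max b 1 := by split_ifs <;> omega
      rw [this]
    rw [hstep, mr_inner, if_neg (Nat.succ_ne_zero m)]
    by_cases h : m = 0
    · subst h; norm_num
    · rw [if_neg h]
      simp only [Prod.mk.injEq]
      refine ⟨?_, ?_, trivial⟩ <;> push_cast <;> omega

lemma mr_sorted_eq (l : List Char) :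
    PySem.List.sorted (l.filter (fun c => ("\"Vv>".toList).contains c)) (fun x => x) false =
    List.replicate (l.count '"') '"' ++ List.replicate (l.count '>') '>' ++
    List.replicate (l.count 'V') 'V' ++ List.replicate (l.count 'v') 'v' := by
  have hts : "\"Vv>".toList = ['"', 'V', 'v', '>'] := by decide
  apply PySem.List.sorted_id_eq_of_perm_of_pairwise
  · rw [List.perm_iff_count]
    intro x
    simp only [List.count_append, List.count_replicate]
    by_cases hx : x ∈ ['"', 'V', 'v', '>']
    · rw [List.count_filter (by simp [hts, hx])]
      fin_cases hx <;> simp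
    · have hnm : x ∉ l.filter (fun c => ("\"Vv>".toList).contains c) := by
        intro hmem
        have h2 := (List.mem_filter.mp hmem).2
        rw [hts] at h2
        simp only [List.contains_eq_mem, decide_eq_true_eq] at h2
        exact hx h2
      rw [List.count_eq_zero.mpr hnm]
      simp only [List.mem_cons, List.not_mem_nil, not_or] at hx
      obtain ⟨n1, n2, n3, n4, -⟩ := hx
      simp [Ne.symm n1, Ne.symm n2, Ne.symm n3, Ne.symm n4]
  · simp only [List.pairwise_append, List.pairwise_replicate, List.mem_append, List.mem_replicate]
    refine ⟨⟨⟨?_, ?_, ?_⟩, ?_, ?_⟩, ?_, ?_⟩ <;>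
      first
        | exact Or.inr le_rfl
        | (intro a ha b hb
           rcases hb with ⟨-, rfl⟩ <;>
             first
               | (rcases ha with (⟨-, rfl⟩ | ⟨-, rfl⟩) | ⟨-, rfl⟩ <;> decide)
               | (rcases ha with ⟨-, rfl⟩ | ⟨-, rfl⟩ <;> decide)
               | (rcases ha with ⟨-, rfl⟩; decide))

-- ===== VERDICT (by name: the statement is the Claim_ definition above) =====
theorem min_rotations_spec : Claim_equal_min_rotations := by
  intro s _
  unfold Spec_min_rotations min_rotations min_rotations_alt
  have h0 : (PySem.Dict.ofList [('"', (0:Int)), ('V', 0), ('v', 0), ('>', 0)]) =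
      PySem.Dict.mk [('"', 0), ('V', 0), ('v', 0), ('>', 0)] := by decide
  simp only [h0, mr_loop, mr_sorted_eq, PySem.Dict.values, List.map, List.foldl,
             List.foldl_append]
  by_cases h1 : s.toList.count '"' = 0 <;> by_cases h2 : s.toList.count '>' = 0 <;>
    by_cases h3 : s.toList.count 'V' = 0 <;> by_cases h4 : s.toList.count 'v' = 0 <;>
    simp_all [mr_block] <;> omega
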